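-- pv_equiv track=rewrite | github.com/achintya007-arch/quantum-graph-coloring | qgc/core/coloring.py | decode_one_hot
-- ===== SOURCE A (Python) =====
-- def decode_one_hot(bitstring_index: int, n_nodes: int, k: int) -> list:
--     """
--     Decode a one-hot QUBO bitstring index into a node-color list.
--
--     Variable ordering: x_{i,c} at bit position i*k + c.
--     If no bit is set for a node (invalid state), defaults to color 0.
--
--     Args:
--         bitstring_index: Integer index of the measured basis state.
--         n_nodes:         Number of graph nodes.
--         k:               Number of colors.
--
--     Returns:
--         coloring: List of length n_nodes with color indices in [0, k).
--     """
--     n_qubits = n_nodes * k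
--     bits     = [(bitstring_index >> q) & 1 for q in range(n_qubits)]
--     coloring = []
--
--     for i in range(n_nodes):
--         one_hot = bits[i * k : (i + 1) * k]
--         color = one_hot.index(1) if 1 in one_hot else 0
--         coloring.append(color)
--
--     return coloring
-- ===== SOURCE B (Python) =====
-- def decode_one_hot(bitstring_index: int, n_nodes: int, k: int) -> list:
--     """Decode a one-hot QUBO bitstring index into a node-color list.
--
--     Per node, mask out its k-bit chunk and take the position of the lowest
--     set bit (chunk & -chunk) in O(1), defaulting to color 0 when no bit is set.
--     """
--     mask = (1 << k) - 1
--     coloring = []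
--     x = bitstring_index
--     for _ in range(n_nodes):
--         chunk = x & mask
--         coloring.append((chunk & -chunk).bit_length() - 1 if chunk else 0)
--         x >>= k
--     return coloring
-- ===== Notes on version B (the rewrite author's own statement) =====
-- stated objective: faster
-- what changed: Instead of materializing all n_nodes*k bits into a list and scanning each node's k-slice with 'in'/'.index', B masks out each node's k-bit chunk and reads the position of its lowest set bit via (chunk & -chunk).bit_length() - 1, one O(1)-word-op step per node.
-- outside the precondition, e.g. on decode_one_hot(0, 2, -1): A returns [0, 0], B raises ValueError
import Mathlib
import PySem

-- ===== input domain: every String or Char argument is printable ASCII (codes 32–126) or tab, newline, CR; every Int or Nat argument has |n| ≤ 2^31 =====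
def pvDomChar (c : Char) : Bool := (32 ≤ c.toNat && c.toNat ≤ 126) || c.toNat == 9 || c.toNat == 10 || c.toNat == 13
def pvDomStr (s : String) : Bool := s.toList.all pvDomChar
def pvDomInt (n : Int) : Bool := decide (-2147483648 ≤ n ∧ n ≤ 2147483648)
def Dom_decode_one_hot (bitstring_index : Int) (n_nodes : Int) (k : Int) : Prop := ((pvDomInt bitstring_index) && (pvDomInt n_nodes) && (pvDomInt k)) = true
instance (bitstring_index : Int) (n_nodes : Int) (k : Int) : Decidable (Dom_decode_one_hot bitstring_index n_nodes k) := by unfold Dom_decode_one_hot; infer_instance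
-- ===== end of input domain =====

-- B replaces A's per-node scan of a materialized bit list by masking each node's
-- k-bit chunk and reading its lowest set bit via (chunk & -chunk).bit_length()-1.


-- ===== PORT A =====
-- 'x >> q' is 'x >>> q.toNat' (q ranges over range(n_qubits), so q ≥ 0); '& 1' is PySem.Int.band · 1.
def decode_one_hot (bitstring_index : Int) (n_nodes : Int) (k : Int) : List Int :=
  let n_qubits := n_nodes * k
  let bits := (PySem.List.pyRange 0 n_qubits 1).map
    (fun q => PySem.Int.band (bitstring_index >>> q.toNat) 1)
  (PySem.List.pyRange 0 n_nodes 1).foldl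
    (fun coloring i =>
      let one_hot := PySem.List.slice bits (some (i * k)) (some ((i + 1) * k))
      let color : Int :=
        if (1 : Int) ∈ one_hot then (((PySem.List.index? one_hot 1).getD 0 : Nat) : Int) else 0
      coloring ++ [color]) []

-- ===== PORT B =====
-- '(1 << k) - 1' is '(1 <<< k.toNat) - 1' and 'x >>= k' is '>>> k.toNat' (Pre_ gives 0 ≤ k);
-- '.bit_length()' is PySem.Int.bitLength, '&' is PySem.Int.band, 'if chunk' is 'if chunk ≠ 0'.
def decode_one_hot_alt (bitstring_index : Int) (n_nodes : Int) (k : Int) : List Int :=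
  let mask : Int := (1 <<< k.toNat) - 1
  let r := (PySem.List.pyRange 0 n_nodes 1).foldl
    (fun (st : List Int × Int) _ =>
      let chunk := PySem.Int.band st.2 mask
      let color : Int :=
        if chunk ≠ 0 then ((PySem.Int.bitLength (PySem.Int.band chunk (-chunk)) : Int) - 1) else 0
      (st.1 ++ [color], st.2 >>> k.toNat))
    ([], bitstring_index)
  r.1

-- ===== PRECONDITION & SPEC =====
-- Pre_ excludes k < 0, where A still returns [0]*n_nodes (empty slices of an empty bit list)
-- but B's shift '1 << k' by a negative amount raises ValueError.
def Pre_decode_one_hot (bitstring_index : Int) (n_nodes : Int) (k : Int) : Prop := 0 ≤ k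
instance (bitstring_index : Int) (n_nodes : Int) (k : Int) : Decidable (Pre_decode_one_hot bitstring_index n_nodes k) := by unfold Pre_decode_one_hot; infer_instance
def pvWitness_decode_one_hot : Int × Int × Int := (5, 2, 2)

def Spec_decode_one_hot (bitstring_index : Int) (n_nodes : Int) (k : Int) (out : List Int) : Prop := out = decode_one_hot_alt bitstring_index n_nodes k
instance (bitstring_index : Int) (n_nodes : Int) (k : Int) (out : List Int) : Decidable (Spec_decode_one_hot bitstring_index n_nodes k out) := by unfold Spec_decode_one_hot; infer_instance

-- ===== CLAIM (what is proved, stated in full; the proofs are below) =====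
def Claim_equal_decode_one_hot : Prop := ∀ (bitstring_index : Int) (n_nodes : Int) (k : Int), Dom_decode_one_hot bitstring_index n_nodes k → Pre_decode_one_hot bitstring_index n_nodes k → Spec_decode_one_hot bitstring_index n_nodes k (decode_one_hot bitstring_index n_nodes k)

-- ===== LEMMAS AND PROOFS =====

-- c with its lowest set bit cleared, subtracted from c: the lowest set bit of c.
def pvLow (c : Nat) : Nat := c - (c &&& (c - 1))

-- B's per-node color as a function of the masked chunk.
def pvBColor (chunk : Int) : Int :=
  if chunk ≠ 0 then ((PySem.Int.bitLength (PySem.Int.band chunk (-chunk)) : Int) - 1) else 0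

-- A's per-node color as a function of the node's one-hot slice.
def pvAColor (bl : List Int) : Int :=
  if (1 : Int) ∈ bl then (((PySem.List.index? bl 1).getD 0 : Nat) : Int) else 0

-- The K low bits of a natural number, least significant first (what A's slice holds).
def pvBits (K : Nat) (c : Nat) : List Int :=
  (List.range K).map (fun j => ((c / 2 ^ j % 2 : Nat) : Int))

lemma pvAndOdd (m : Nat) : (2*m+1) &&& (2*m) = 2*m := by
  have h := Nat.land_bit true m false m
  simp [Nat.bit, Nat.and_self] at h
  simpa [Nat.bit, two_mul] using h
lemma pvAndEven (m : Nat) (hm : 0 < m) : (2*m) &&& (2*m-1) = 2*(m &&& (m-1)) := by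
  have h := Nat.land_bit false m true (m-1)
  simp only [Nat.bit, Bool.and_true, cond_false, cond_true] at h
  have h2 : 2*(m-1)+1 = 2*m - 1 := by omega
  rw [h2] at h
  exact h
theorem pvBand_neg_self (c : Nat) (hc : 0 < c) :
    PySem.Int.band (c : Int) (-(c : Int)) = ((pvLow c : Nat) : Int) := by
  have h1 : ¬ (0 ≤ -(c:Int)) := by omega
  simp only [PySem.Int.band, pvLow]
  rw [if_pos (by positivity), if_neg h1]
  have h2 : (- -(c:Int) - 1).toNat = c - 1 := by omega
  rw [h2, Int.toNat_natCast]

lemma pvLow_odd (m : Nat) : pvLow (2*m+1) = 1 := by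
  unfold pvLow
  rw [show 2*m+1-1 = 2*m from by omega, pvAndOdd]
  omega
lemma pvLow_even (m : Nat) (hm : 0 < m) : pvLow (2*m) = 2 * pvLow m := by
  unfold pvLow
  rw [pvAndEven m hm]
  have := Nat.and_le_left (n := m) (m := m-1)
  omega
lemma pvLow_pos (c : Nat) (hc : 0 < c) : 0 < pvLow c := by
  unfold pvLow
  have h := Nat.and_le_right (n := c) (m := c-1)
  omega

lemma pvBColor_odd (m : Nat) : pvBColor ((2*m+1 : Nat) : Int) = 0 := by
  have hpos : (0:Int) < ((2*m+1:Nat):Int) := by positivity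
  unfold pvBColor
  rw [if_pos (by omega), pvBand_neg_self _ (by omega), pvLow_odd]
  norm_num
  decide

lemma pvBColor_even (m : Nat) (hm : 0 < m) :
    pvBColor ((2*m : Nat) : Int) = pvBColor ((m:Nat):Int) + 1 := by
  unfold pvBColor
  rw [if_pos (by omega), if_pos (by omega)]
  rw [pvBand_neg_self _ (by omega), pvBand_neg_self _ hm, pvLow_even m hm]
  have hz := pvLow_pos m hm
  rw [PySem.Int.bitLength_natCast (by omega : 0 < 2 * pvLow m)]
  rw [show (2 * pvLow m) / 2 = pvLow m from by omega]
  push_cast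
  ring

theorem pvChunk (K : Nat) : ∀ c : Nat, c < 2 ^ K →
    (((1 : Int) ∈ pvBits K c ↔ c ≠ 0) ∧ pvAColor (pvBits K c) = pvBColor (c : Int)) := by
  induction K with
  | zero =>
    intro c hc
    interval_cases c
    simp [pvBits, pvAColor, pvBColor]
  | succ K ih =>
    intro c hc
    have hsplit : pvBits (K+1) c = ((c % 2 : Nat) : Int) :: (List.range K).map (fun j => ((c / 2 ^ (j+1) % 2 : Nat) : Int)) := by
      simp [pvBits, List.range_succ_eq_map, List.map_map, Function.comp_def]
    have htail : (List.range K).map (fun j => ((c / 2 ^ (j+1) % 2 : Nat) : Int)) = pvBits K (c / 2) := by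
      unfold pvBits
      refine List.map_congr_left (fun j _ => ?_)
      rw [pow_succ, Nat.div_div_eq_div_mul, Nat.mul_comm]
    rw [htail] at hsplit
    by_cases hc0 : c = 0
    · subst hc0
      constructor
      · constructor
        · intro hmem
          exfalso
          simp [pvBits] at hmem
        · intro h; exact absurd rfl h
      · have hnm : ¬ ((1:Int) ∈ pvBits (K+1) 0) := by simp [pvBits]
        simp [pvAColor, hnm, pvBColor]
    · rcases Nat.even_or_odd c with he | ho
      · -- even, c = 2*m, m > 0
        obtain ⟨m, hm⟩ := he
        have hm2 : c = 2 * m := by omega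
        have hmpos : 0 < m := by omega
        have hmlt : m < 2 ^ K := by
          rw [pow_succ] at hc; omega
        have hdiv : c / 2 = m := by omega
        have hhead : ((c % 2 : Nat) : Int) = 0 := by
          have : c % 2 = 0 := by omega
          simp [this]
        obtain ⟨ihmem, ihval⟩ := ih m hmlt
        rw [hdiv] at hsplit
        have hmem1 : ((1:Int) ∈ pvBits (K+1) c ↔ (1:Int) ∈ pvBits K m) := by
          rw [hsplit, hhead]
          simp
        constructor
        · rw [hmem1, ihmem]; omega
        · by_cases hmm : m = 0
          · omega
          · have h1m : (1:Int) ∈ pvBits K m := ihmem.mpr hmm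
            obtain ⟨i', hi'⟩ := Option.isSome_iff_exists.mp ((PySem.List.index?_isSome_iff _ _).mpr h1m)
            have hB : pvBColor ((m : Nat) : Int) = (i' : Int) := by
              unfold pvAColor at ihval
              rw [if_pos h1m, hi'] at ihval
              simpa using ihval.symm
            have mem0 : (1:Int) ∈ ((0:Int) :: pvBits K m) := List.mem_cons_of_mem _ h1m
            unfold pvAColor
            rw [hsplit, hhead, if_pos mem0,
                PySem.List.index?_cons_of_ne (pvBits K m) (by norm_num : (0:Int) ≠ 1), hi']
            simp only [Option.map_some, Option.getD_some]
            rw [hm2, pvBColor_even m hmpos, hB]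
            push_cast
            ring
      · -- odd, c = 2*m+1
        obtain ⟨m, hm⟩ := ho
        have hhead : ((c % 2 : Nat) : Int) = 1 := by
          have : c % 2 = 1 := by omega
          simp [this]
        have hmem : (1:Int) ∈ pvBits (K+1) c := by
          rw [hsplit, hhead]; exact List.mem_cons_self
        constructor
        · exact ⟨fun _ => hc0, fun _ => hmem⟩
        · unfold pvAColor
          rw [if_pos hmem, hsplit, hhead, PySem.List.index?_cons_self]
          rw [hm, pvBColor_odd]
          simp

lemma pvNegEmod (y M : Int) (hM : 0 < M) : (-y - 1) % M = M - 1 - y % M := by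
  have hr0 : 0 ≤ y % M := Int.emod_nonneg y (by omega)
  have hr1 : y % M < M := Int.emod_lt_of_pos y hM
  have hs : -y - 1 = (M - 1 - y % M) + M * (-(y / M) - 1) := by
    linear_combination Int.mul_ediv_add_emod y M
  rw [hs, Int.add_mul_emod_self_left, Int.emod_eq_of_lt (by omega) (by omega)]

theorem pvMask_eq_emod (y : Int) (K : Nat) :
    PySem.Int.band y (((2 ^ K : Nat) : Int) - 1) = y % ((2 ^ K : Nat) : Int) := by
  have hp : (1:Nat) ≤ 2 ^ K := Nat.one_le_two_pow
  by_cases hy : 0 ≤ y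
  · rw [PySem.Int.band_of_nonneg hy (by omega)]
    have h2 : (((2 ^ K : Nat) : Int) - 1).toNat = 2 ^ K - 1 := by omega
    rw [h2, Nat.and_two_pow_sub_one_eq_mod]
    push_cast
    rw [Int.toNat_of_nonneg hy]
  · simp only [PySem.Int.band]
    rw [if_neg hy, if_pos (by omega : (0:Int) ≤ ((2^K:Nat):Int) - 1)]
    have h2 : (((2 ^ K : Nat) : Int) - 1).toNat = 2 ^ K - 1 := by omega
    rw [h2, Nat.and_comm, Nat.and_two_pow_sub_one_eq_mod]
    have hcast : (((-y - 1).toNat % 2 ^ K : Nat) : Int) = (-y - 1) % ((2^K:Nat):Int) := by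
      push_cast
      rw [Int.toNat_of_nonneg (by omega)]
    have hneg := pvNegEmod y ((2^K:Nat):Int) (by omega)
    have hr0 : 0 ≤ y % ((2^K:Nat):Int) := Int.emod_nonneg y (by omega)
    have hr1 : y % ((2^K:Nat):Int) < ((2^K:Nat):Int) := Int.emod_lt_of_pos y (by omega)
    omega

lemma pvBit (x : Int) (K i j : Nat) (hj : j < K) :
    PySem.Int.band (x >>> (i * K + j)) 1
      = (((((x >>> (i * K)) % ((2 ^ K : Nat) : Int)).toNat / 2 ^ j % 2 : Nat)) : Int) := by
  rw [PySem.Int.band_one, PySem.Int.mod_eq_emod_of_pos (by norm_num),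
      Int.shiftRight_add, Int.shiftRight_eq_div_pow]
  set y := x >>> (i * K) with hy
  set M : Int := ((2 ^ K : Nat) : Int) with hM
  have hMpos : (0:Int) < M := by positivity
  have hr0 : 0 ≤ y % M := Int.emod_nonneg y (by omega)
  have hr1 : y % M < M := Int.emod_lt_of_pos y hMpos
  have hsplitM : M = ((2 ^ j : Nat) : Int) * ((2 ^ (K - j) : Nat) : Int) := by
    rw [hM]; push_cast; rw [← pow_add]; congr 1; omega
  have hKj : 0 < K - j := by omega
  have hdecomp : y = y % M + ((2 ^ j : Nat) : Int) * (((2 ^ (K - j) : Nat) : Int) * (y / M)) := by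
    have h := Int.mul_ediv_add_emod y M
    rw [hsplitM] at h ⊢
    linarith [h]
  -- y / 2^j = (y % M) / 2^j + 2^(K-j) * (y/M)
  have hdiv : y / ((2 ^ j : Nat) : Int) = (y % M) / ((2 ^ j : Nat) : Int) + ((2 ^ (K - j) : Nat) : Int) * (y / M) := by
    conv_lhs => rw [hdecomp]
    rw [Int.add_mul_ediv_left _ _ (by positivity : ((2 ^ j : Nat) : Int) ≠ 0)]
  rw [hdiv]
  have h2 : ((2 ^ (K - j) : Nat) : Int) * (y / M) = 2 * (((2 ^ (K - j - 1) : Nat) : Int) * (y / M)) := by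
    rw [show (2 ^ (K - j) : Nat) = 2 * 2 ^ (K - j - 1) from by
      rw [← pow_succ']; congr 1; omega]
    push_cast; ring
  rw [h2, Int.add_mul_emod_self_left]
  -- now: (y % M) / ↑(2^j) % 2 = ↑((y % M).toNat / 2^j % 2)
  have hc : ((y % M).toNat : Int) = y % M := Int.toNat_of_nonneg hr0
  rw [Int.natCast_emod, Int.natCast_ediv, hc]
  norm_cast

lemma pvSlice (f : Nat → Int) (n K i : Nat) (hi : i < n) :
    PySem.List.slice ((List.range (n * K)).map f)
        (some ((i * K : Nat) : Int)) (some (((i * K + K : Nat) : Int)))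
      = (List.range K).map (fun j => f (i * K + j)) := by
  rw [PySem.List.slice_natCast]
  have hlen : i * K + K ≤ n * K := by
    calc i * K + K = (i+1) * K := by ring
    _ ≤ n * K := Nat.mul_le_mul_right K hi
  apply List.ext_getElem
  · simp only [List.length_take, List.length_drop, List.length_map, List.length_range]
    omega
  · intro j hj1 hj2
    simp only [List.getElem_take, List.getElem_drop, List.getElem_map, List.getElem_range]

lemma pvBLoop (mask : Int) (K : Nat) (f : Int → Int) (l : List Int) :
    ∀ (acc : List Int) (x : Int),
      (l.foldl (fun (st : List Int × Int) _ =>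
          (st.1 ++ [f (PySem.Int.band st.2 mask)], st.2 >>> K)) (acc, x)).1
        = acc ++ (List.range l.length).map
            (fun i => f (PySem.Int.band (x >>> (i * K)) mask)) := by
  induction l with
  | nil => intro acc x; simp
  | cons hd tl ih =>
    intro acc x
    simp only [List.foldl_cons, List.length_cons, List.range_succ_eq_map, List.map_cons,
      List.map_map, Function.comp_def]
    rw [ih]
    simp only [Nat.zero_mul, Int.shiftRight_zero, List.append_assoc, List.singleton_append]
    congr 2
    refine List.map_congr_left (fun j _ => ?_)
    rw [show j.succ * K = K + K * j from by rw [Nat.succ_mul]; ring, Int.shiftRight_add, Nat.mul_comm]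


-- ===== VERDICT (by name: the statement is the Claim_ definition above) =====
theorem decode_one_hot_spec : Claim_equal_decode_one_hot := by
  intro x n k _ hpre
  have hk : k = ((k.toNat : Nat) : Int) := (Int.toNat_of_nonneg hpre).symm
  set K := k.toNat with hK
  unfold Spec_decode_one_hot
  simp only [decode_one_hot, decode_one_hot_alt]
  rw [PySem.List.foldl_append_singleton_eq_map]
  rw [pvBLoop ((1 <<< K) - 1) K
    (fun chunk => if chunk ≠ 0 then ((PySem.Int.bitLength (PySem.Int.band chunk (-chunk)) : Int) - 1) else 0)
    (PySem.List.pyRange 0 n 1) [] x]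
  simp only [List.nil_append, PySem.List.pyRange_one 0 n, sub_zero, List.map_map,
    List.length_map, List.length_range]
  refine List.map_congr_left (fun i hi => ?_)
  rw [List.mem_range] at hi
  have hn : 0 < n := by
    by_contra h
    have : n.toNat = 0 := by omega
    omega
  simp only [Function.comp_def, zero_add, Nat.one_shiftLeft,
    Int.shiftRight_natCast_right]
  -- normalize B's chunk
  set M : Int := ((2 ^ K : Nat) : Int) with hM
  have hMpos : (0:Int) < M := by positivity
  set y := x >>> (i * K) with hy
  have hc0 : 0 ≤ y % M := Int.emod_nonneg y (by omega)
  have hclt : (y % M).toNat < 2 ^ K := by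
    have := Int.emod_lt_of_pos y hMpos
    omega
  have hcast : ((((y % M).toNat : Nat)) : Int) = y % M := Int.toNat_of_nonneg hc0
  rw [pvMask_eq_emod, ← hM, ← hcast]
  -- normalize A's one-hot slice
  have hbits : PySem.List.pyRange 0 (n * k) 1 = (List.range (n.toNat * K)).map (fun q => ((q : Nat) : Int)) := by
    rw [PySem.List.pyRange_one, sub_zero]
    have : (n * k).toNat = n.toNat * K := by
      rw [hk, show n = ((n.toNat : Nat) : Int) from by omega, ← Nat.cast_mul, Int.toNat_natCast, Int.toNat_natCast]
    rw [this]
    exact List.map_congr_left (fun q _ => by simp)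
  rw [hbits, List.map_map]
  have hidx1 : (i : Int) * k = ((i * K : Nat) : Int) := by rw [hk]; push_cast; ring
  have hidx2 : ((i : Int) + 1) * k = ((i * K + K : Nat) : Int) := by rw [hk]; push_cast; ring
  rw [hidx1, hidx2]
  simp only [Function.comp_def, Int.toNat_natCast]
  rw [pvSlice _ n.toNat K i hi]
  have hone : (List.range K).map (fun j => PySem.Int.band (x >>> (i * K + j)) 1)
      = pvBits K (y % M).toNat := by
    refine List.map_congr_left (fun j hj => ?_)
    rw [List.mem_range] at hj
    rw [pvBit x K i j hj, ← hy, ← hM]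
  rw [hone]
  exact (pvChunk K (y % M).toNat hclt).2
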